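-- pv_equiv track=rewrite | github.com/AminKhalif/formation | practical_problems/match_fellows/solution.py | canMatchFellows
-- ===== SOURCE A (Python) =====
-- def canMatchFellows(skillMap: dict) -> bool:
--     skill_freq_map = {}
--
--     for skill in skillMap.values():
--         if skill not in skill_freq_map:
--             skill_freq_map[skill] = 1
--         else:
--             skill_freq_map[skill] +=1
--
--
--     for skill in skill_freq_map.values():
--         if skill%2 != 0:
--             return False
--
--     return True
--
-- skillMap = {"oliver": 3, "pixel": 3, "pinky": 3, "tobey": 3}
-- ===== SOURCE B (Python) =====
-- def canMatchFellows(skillMap: dict) -> bool: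
--     odd = set()
--     for skill in skillMap.values():
--         if skill in odd:
--             odd.remove(skill)
--         else:
--             odd.add(skill)
--     return len(odd) == 0
-- ===== Notes on version B (the rewrite author's own statement) =====
-- stated objective: idiomatic
-- what changed: Replaces the frequency dictionary plus a second parity-checking loop with a single pass that toggles each value in/out of an 'odd' set and tests emptiness at the end.
import Mathlib
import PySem

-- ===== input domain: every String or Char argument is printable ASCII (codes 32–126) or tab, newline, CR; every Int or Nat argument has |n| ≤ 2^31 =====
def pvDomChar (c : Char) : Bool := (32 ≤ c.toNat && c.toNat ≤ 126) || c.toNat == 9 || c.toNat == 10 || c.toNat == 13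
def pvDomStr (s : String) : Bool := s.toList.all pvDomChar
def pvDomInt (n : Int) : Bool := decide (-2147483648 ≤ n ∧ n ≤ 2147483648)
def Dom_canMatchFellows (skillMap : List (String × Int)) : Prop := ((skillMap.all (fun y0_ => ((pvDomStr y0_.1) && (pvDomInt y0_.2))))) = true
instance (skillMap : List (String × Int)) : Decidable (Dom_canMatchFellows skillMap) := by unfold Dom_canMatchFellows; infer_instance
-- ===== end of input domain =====

-- B replaces A's count dictionary + second parity loop with a single odd-set toggle pass (idiomatic, same cost).


-- ===== PORT A =====
def canMatchFellows (skillMap : List (String × Int)) : Bool :=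
  let freq : PySem.Dict Int Int :=
    (PySem.Dict.ofList skillMap).values.foldl
      (fun m skill =>
        if m.contains skill = false then m.insert skill 1
        else m.modify skill 0 (· + 1))
      PySem.Dict.empty
  freq.values.all (fun c => PySem.Int.mod c 2 == 0)

-- ===== PORT B =====
def canMatchFellows_alt (skillMap : List (String × Int)) : Bool :=
  let odd : PySem.Set Int :=
    (PySem.Dict.ofList skillMap).values.foldl
      (fun s skill =>
        if PySem.Set.contains s skill then PySem.Set.discard s skill
        else PySem.Set.add s skill)
      PySem.Set.empty
  PySem.Set.len odd == 0

-- ===== PRECONDITION & SPEC =====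
def Spec_canMatchFellows (skillMap : List (String × Int)) (out : Bool) : Prop := out = canMatchFellows_alt skillMap
instance (skillMap : List (String × Int)) (out : Bool) : Decidable (Spec_canMatchFellows skillMap out) := by unfold Spec_canMatchFellows; infer_instance

-- ===== CLAIM (what is proved, stated in full; the proofs are below) =====
def Claim_equal_canMatchFellows : Prop := ∀ (skillMap : List (String × Int)), Dom_canMatchFellows skillMap → Spec_canMatchFellows skillMap (canMatchFellows skillMap)

-- ===== LEMMAS AND PROOFS =====

-- A's loop body is extensionally Counter's step, so A's dict is Counter(values)
theorem pv_stepA (m : PySem.Dict Int Int) (x : Int) :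
    (if m.contains x = false then m.insert x 1 else m.modify x 0 (· + 1))
      = m.modify x 0 (· + 1) := by
  cases h : m.contains x with
  | true => simp
  | false =>
    rw [PySem.Dict.contains_eq_isSome_get?] at h
    simp [PySem.Dict.modify, PySem.Dict.getD, Option.isSome_eq_false_iff,
      Option.isNone_iff_eq_none] at *
    simp [h]

theorem pv_foldA (xs : List Int) :
    xs.foldl (fun m skill =>
        if m.contains skill = false then m.insert skill 1
        else m.modify skill 0 (· + 1)) PySem.Dict.empty
      = PySem.Dict.counter xs := by
  rw [PySem.Dict.counter_eq_foldl]
  congr 1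
  funext m x
  exact pv_stepA m x

-- B's toggle loop: the result is duplicate-free and holds exactly the odd-count values
theorem pv_B_inv (xs : List Int) : ∀ (s : PySem.Set Int), s.Nodup →
    (xs.foldl (fun s skill =>
        if PySem.Set.contains s skill then PySem.Set.discard s skill
        else PySem.Set.add s skill) s).Nodup ∧
    ∀ k : Int, k ∈ xs.foldl (fun s skill =>
        if PySem.Set.contains s skill then PySem.Set.discard s skill
        else PySem.Set.add s skill) s ↔ ¬ (k ∈ s ↔ xs.count k % 2 = 1) := by
  induction xs with
  | nil => intro s hs; refine ⟨hs, ?_⟩; intro k; simp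
  | cons x xs ih =>
    intro s hs
    have hns : (if PySem.Set.contains s x then PySem.Set.discard s x
        else PySem.Set.add s x).Nodup := by
      split
      · exact PySem.Set.nodup_discard s x hs
      · exact PySem.Set.nodup_add s x hs
    obtain ⟨hn, hmem⟩ := ih _ hns
    refine ⟨by simpa using hn, ?_⟩
    intro k
    simp only [List.foldl_cons]
    rw [hmem k]
    by_cases hx : x ∈ s <;> by_cases hk : k = x <;>
      [skip; (have hxk : x ≠ k := fun h => hk h.symm); skip;
       (have hxk : x ≠ k := fun h => hk h.symm)] <;>
      by_cases hks : k ∈ s <;>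
      simp_all [PySem.Set.mem_discard, PySem.Set.mem_add, List.count_cons] <;>
      omega

-- A's verdict characterised: every value of the list has even count
theorem pv_A_iff (xs : List Int) :
    (PySem.Dict.counter xs).values.all (fun c => PySem.Int.mod c 2 == 0) = true
      ↔ ∀ k : Int, xs.count k % 2 = 0 := by
  rw [PySem.Dict.values_eq_map_keys _ (PySem.Dict.nodup_keys_counter xs) 0]
  simp only [PySem.Dict.keys_counter, PySem.Dict.getD_counter, List.all_map,
    List.all_eq_true, PySem.Set.mem_ofList, Function.comp]
  constructor
  · intro h k
    by_cases hk : k ∈ xs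
    · have := h k hk
      simp [PySem.Int.mod_eq_zero_iff_dvd] at this
      omega
    · simp [List.count_eq_zero.2 hk]
  · intro h k hk
    have := h k
    simp [PySem.Int.mod_eq_zero_iff_dvd]
    omega

-- ===== VERDICT (by name: the statement is the Claim_ definition above) =====
theorem canMatchFellows_spec : Claim_equal_canMatchFellows := by
  intro skillMap _
  unfold Spec_canMatchFellows canMatchFellows canMatchFellows_alt
  rw [pv_foldA]
  obtain ⟨hn, hmem⟩ := pv_B_inv (PySem.Dict.ofList skillMap).values
    PySem.Set.empty List.nodup_nil
  rw [Bool.eq_iff_iff]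
  rw [pv_A_iff]
  simp only [PySem.Set.len, PySem.List.len_eq, beq_iff_eq, Nat.cast_eq_zero,
    List.length_eq_zero_iff, List.eq_nil_iff_forall_not_mem]
  constructor
  · intro h k hk
    rw [hmem k] at hk
    simp at hk
    have := h k
    omega
  · intro h k
    have hk := h k
    rw [hmem k] at hk
    simp at hk
    omega
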